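-- pv_equiv track=rewrite | github.com/JKatzwinkel/aed-tei | peret.py | _translations
-- ===== SOURCE A (Python) =====
-- def _register_bts_qualified_property(
--     registry: dict, qualifier: str, value: str
-- ) -> dict:
--     """ add a value to the list stored under the accompaning qualifier.
--
--     >>> _register_bts_qualified_property({}, 'k', 'v')
--     {'k': ['v']}
--
--     """
--     if qualifier and value:
--         registry[qualifier] = registry.get(qualifier, []) + [value]
--     return registry
--
-- def _translations(bts_entry: dict) -> dict:
--     """ extract translations from BTS couchdb dump JSON object and group
--     them under their language values.
--
--     >>> t = {'value': 'vulture', 'lang': 'en'}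
--     >>> _translations({'translations': {'translations': [t]}})
--     {'translations': {'en': ['vulture']}}
--
--     """
--     res = {}
--     for translation in bts_entry.get('translations', {}).get(
--         'translations', []
--     ):
--         _register_bts_qualified_property(
--             res, translation.get('lang'), translation.get('value')
--         )
--     return {'translations': res}
-- ===== SOURCE B (Python) =====
-- def _translations(bts_entry: dict) -> dict:
--     trs = bts_entry.get('translations', {}).get('translations', [])
--     valid = [(t.get('lang'), t.get('value')) for t in trs
--              if t.get('lang') and t.get('value')]
--     res = {lang: [v for l, v in valid if l == lang]
--            for lang in dict.fromkeys(l for l, _ in valid)}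
--     return {'translations': res}
-- ===== Notes on version B (the rewrite author's own statement) =====
-- stated objective: alternative
-- what changed: Replaces the single-pass dict accumulation with helper calls by a filter-then-group decomposition: build the list of valid (lang, value) pairs once, then map over the deduplicated languages, gathering each language's values with a scan of the filtered list.
import Mathlib
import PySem

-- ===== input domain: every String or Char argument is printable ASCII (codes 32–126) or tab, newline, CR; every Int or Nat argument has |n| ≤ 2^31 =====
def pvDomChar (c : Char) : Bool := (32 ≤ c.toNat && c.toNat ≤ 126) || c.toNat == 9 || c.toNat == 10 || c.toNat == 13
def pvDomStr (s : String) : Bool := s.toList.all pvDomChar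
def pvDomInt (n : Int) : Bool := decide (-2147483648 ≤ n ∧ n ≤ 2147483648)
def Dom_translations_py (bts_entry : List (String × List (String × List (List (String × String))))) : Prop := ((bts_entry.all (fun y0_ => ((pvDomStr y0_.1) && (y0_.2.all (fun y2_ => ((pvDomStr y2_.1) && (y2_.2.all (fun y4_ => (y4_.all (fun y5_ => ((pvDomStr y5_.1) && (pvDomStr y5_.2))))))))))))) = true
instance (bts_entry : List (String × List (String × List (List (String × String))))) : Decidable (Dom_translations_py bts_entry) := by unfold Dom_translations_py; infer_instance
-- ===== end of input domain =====

-- ===== PORT A =====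
-- B regroups the same data by a filter-then-group decomposition instead of A's
-- single-pass dict accumulation (objective: alternative; same cost class).
def registerBtsQualifiedProperty (registry : PySem.Dict String (List String))
    (qualifier value : Option String) : PySem.Dict String (List String) :=
  -- `if qualifier and value:` — truthy iff both keys are present with non-empty strings
  match qualifier, value with
  | some q, some v =>
      if q != "" && v != "" then
        -- registry[qualifier] = registry.get(qualifier, []) + [value]
        registry.modify q [] (fun cur => cur ++ [v])
      else registry
  | _, _ => registry

def translations_py (bts_entry : List (String × List (String × List (List (String × String))))) :
    List (String × List (String × List String)) :=
  let trs := (PySem.Dict.mk ((PySem.Dict.mk bts_entry).getD "translations" [])).getD "translations" []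
  let res := trs.foldl
    (fun r t =>
      registerBtsQualifiedProperty r ((PySem.Dict.mk t).get? "lang") ((PySem.Dict.mk t).get? "value"))
    PySem.Dict.empty
  [("translations", res.items)]

-- ===== PORT B =====
def translations_py_alt (bts_entry : List (String × List (String × List (List (String × String))))) :
    List (String × List (String × List String)) :=
  let trs := (PySem.Dict.mk ((PySem.Dict.mk bts_entry).getD "translations" [])).getD "translations" []
  -- valid = [(t.get('lang'), t.get('value')) for t in trs if t.get('lang') and t.get('value')]
  let valid := trs.filterMap (fun t =>
    match (PySem.Dict.mk t).get? "lang", (PySem.Dict.mk t).get? "value" with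
    | some q, some v => if q != "" && v != "" then some (q, v) else none
    | _, _ => none)
  -- res = {lang: [v for l, v in valid if l == lang] for lang in dict.fromkeys(l for l, _ in valid)}
  let res := (PySem.List.dedup (valid.map Prod.fst)).map
    (fun lang => (lang, (valid.filter (fun p => p.1 == lang)).map Prod.snd))
  [("translations", res)]

-- ===== PRECONDITION & SPEC =====
def Spec_translations_py (bts_entry : List (String × List (String × List (List (String × String))))) (out : List (String × List (String × List String))) : Prop := out = translations_py_alt bts_entry
instance (bts_entry : List (String × List (String × List (List (String × String))))) (out : List (String × List (String × List String))) : Decidable (Spec_translations_py bts_entry out) := by unfold Spec_translations_py; infer_instance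

-- ===== CLAIM (what is proved, stated in full; the proofs are below) =====
def Claim_equal_translations_py : Prop := ∀ (bts_entry : List (String × List (String × List (List (String × String))))), Dom_translations_py bts_entry → Spec_translations_py bts_entry (translations_py bts_entry)

-- ===== LEMMAS AND PROOFS =====

-- the valid (lang, value) pairs B extracts from a translation list
def pvValid (trs : List (List (String × String))) : List (String × String) :=
  trs.filterMap (fun t =>
    match (PySem.Dict.mk t).get? "lang", (PySem.Dict.mk t).get? "value" with
    | some q, some v => if q != "" && v != "" then some (q, v) else none
    | _, _ => none)

-- A's accumulation loop over the raw translations is the modify-loop over the valid pairs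
lemma fold_register_eq (trs : List (List (String × String)))
    (d : PySem.Dict String (List String)) :
    trs.foldl
      (fun r t =>
        registerBtsQualifiedProperty r ((PySem.Dict.mk t).get? "lang") ((PySem.Dict.mk t).get? "value"))
      d
    = (pvValid trs).foldl (fun r p => r.modify p.1 [] (fun cur => cur ++ [p.2])) d := by
  induction trs generalizing d with
  | nil => rfl
  | cons t ts ih =>
    simp only [List.foldl_cons, pvValid, List.filterMap_cons]
    cases hq : (PySem.Dict.mk t).get? "lang" with
    | none => simpa [registerBtsQualifiedProperty, hq, pvValid] using ih d
    | some q =>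
      cases hv : (PySem.Dict.mk t).get? "value" with
      | none => simpa [registerBtsQualifiedProperty, hq, hv, pvValid] using ih d
      | some v =>
        by_cases h : (q != "" && v != "") = true
        · simpa [registerBtsQualifiedProperty, hq, hv, h, pvValid] using ih _
        · simpa [registerBtsQualifiedProperty, hq, hv, h, pvValid] using ih d

-- the modify-loop over pairs, started from the empty dict, has B's grouped items
lemma items_fold_modify (l : List (String × String)) :
    (l.foldl (fun r p => r.modify p.1 [] (fun cur => cur ++ [p.2])) PySem.Dict.empty).items
    = (PySem.List.dedup (l.map Prod.fst)).map
        (fun lang => (lang, (l.filter (fun p => p.1 == lang)).map Prod.snd)) := by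
  have hnd : (l.foldl (fun r p => r.modify p.1 [] (fun cur => cur ++ [p.2])) PySem.Dict.empty).keys.Nodup :=
    PySem.Dict.nodup_keys_foldl_modify_key l Prod.fst [] (fun _ p => (fun cur => cur ++ [p.2]))
      PySem.Dict.empty PySem.Dict.nodup_keys_empty
  rw [PySem.Dict.items_eq_map_keys _ hnd []]
  have hkeys : (l.foldl (fun r p => r.modify p.1 [] (fun cur => cur ++ [p.2])) PySem.Dict.empty).keys
      = PySem.List.dedup (l.map Prod.fst) := by
    rw [PySem.Dict.keys_foldl_modify_key]
    rfl
  rw [hkeys]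
  refine List.map_congr_left (fun q _ => ?_)
  rw [PySem.Dict.getD_foldl_modify_append]
  simp [PySem.Dict.getD_empty]

-- ===== VERDICT (by name: the statement is the Claim_ definition above) =====
theorem translations_py_spec : Claim_equal_translations_py := by
  intro bts_entry _
  unfold Spec_translations_py translations_py translations_py_alt
  dsimp only
  rw [fold_register_eq, items_fold_modify]
  rfl
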